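-- pv_equiv track=rewrite | github.com/jignesh284/assembly_prediction_scripts | baseline.py | transform_dist
-- ===== SOURCE A (Python) =====
-- from itertools import permutations
--
-- def transform_dist(seq1, seq2):
--     cost = 0
--     for element in set(seq1):
--         indices1 = [i for i, e in enumerate(seq1) if e == element]
--         indices2 = [i for i, e in enumerate(seq2) if e == element]
--         cost = cost + abs(len(indices1) - len(indices2))
--
--         shift_costs = []
--         idx_max = max([indices1, indices2], key=len)
--         idx_min = min([indices2, indices1], key=len)
--         for indices in permutations(idx_max):
--             shift_cost = 0
--             for idx in range(len(idx_min)):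
--                 shift_cost = shift_cost + min(abs(idx_min[idx] - indices[idx]), 3)
--             shift_costs.append(shift_cost)
--         cost = cost + min(shift_costs)
--
--     indices = [i for i, e in enumerate(seq2) if e not in seq1]
--     cost = cost + len(indices)
--
--     return cost
-- ===== SOURCE B (Python) =====
-- def _best(mins, maxs):
--     # minimum cost of injectively matching mins into maxs, pair cost min(|a-x|, 3)
--     if not mins:
--         return 0
--     a, rest = mins[0], mins[1:]
--     return min(min(abs(a - maxs[i]), 3) + _best(rest, maxs[:i] + maxs[i + 1:])
--                for i in range(len(maxs)))
--
--
-- def transform_dist(seq1, seq2):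
--     s1 = set(seq1)
--     cost = sum(1 for e in seq2 if e not in s1)
--     for element in s1:
--         I = [i for i, e in enumerate(seq1) if e == element]
--         J = [i for i, e in enumerate(seq2) if e == element]
--         if len(I) < len(J):
--             I, J = J, I
--         cost += len(I) - len(J) + _best(J, I)
--     return cost
-- ===== Notes on version B (the rewrite author's own statement) =====
-- stated objective: alternative
-- what changed: A enumerates all m! permutations of the longer index list and takes the min total; B recursively takes the min over injective matchings of the shorter index list into the longer one (never ordering the m-k unused slots) and counts seq2 elements missing from seq1 via a set built once.
import Mathlib
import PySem

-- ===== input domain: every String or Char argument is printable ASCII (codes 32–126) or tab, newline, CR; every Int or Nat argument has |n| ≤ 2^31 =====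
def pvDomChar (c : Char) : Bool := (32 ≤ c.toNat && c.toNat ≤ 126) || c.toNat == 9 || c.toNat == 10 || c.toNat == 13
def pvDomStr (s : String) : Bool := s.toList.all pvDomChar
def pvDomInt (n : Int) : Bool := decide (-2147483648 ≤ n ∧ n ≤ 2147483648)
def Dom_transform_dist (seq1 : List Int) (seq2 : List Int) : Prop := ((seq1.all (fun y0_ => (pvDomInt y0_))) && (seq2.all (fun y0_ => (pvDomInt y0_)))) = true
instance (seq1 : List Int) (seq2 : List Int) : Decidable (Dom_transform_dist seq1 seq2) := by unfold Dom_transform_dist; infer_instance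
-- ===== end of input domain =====

-- B replaces A's enumeration of all permutations of the longer index list by a recursive
-- min over injective matchings of the shorter index list into the longer one (alternative algorithm).


-- ===== PORT A =====
-- [i for i, e in enumerate(l) if e == element]  (used verbatim by both Pythons)
def pyIndices (l : List Int) (element : Int) : List Int :=
  ((PySem.List.enumerate l).filter (fun p => p.2 == element)).map (fun p => p.1)

def transform_dist (seq1 : List Int) (seq2 : List Int) : Int :=
  -- the loop over set(seq1); the final result is a sum, so Python's hash iteration order is immaterial
  let cost : Int := (PySem.Set.ofList seq1).foldl (fun cost element =>
    let indices1 := pyIndices seq1 element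
    let indices2 := pyIndices seq2 element
    let cost := cost + |(indices1.length : Int) - (indices2.length : Int)|
    -- max([indices1, indices2], key=len) / min([indices2, indices1], key=len): ties pick indices1 / indices2
    let idx_max := if indices1.length < indices2.length then indices2 else indices1
    let idx_min := if indices1.length < indices2.length then indices1 else indices2
    let shift_costs := (PySem.List.permutations idx_max idx_max.length).map (fun indices =>
      (PySem.List.pyRange 0 (idx_min.length : Int) 1).foldl
        (fun sc idx => sc + min (|PySem.List.pyGetD idx_min idx 0 - PySem.List.pyGetD indices idx 0|) 3) 0)
    cost + (PySem.List.min? shift_costs (fun x => x)).getD 0) 0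
  cost + ((((PySem.List.enumerate seq2).filter (fun p => !(seq1.contains p.2))).map (fun p => p.1)).length : Int)

-- ===== PORT B =====
-- _best(mins, maxs): min over i of min(|mins[0]-maxs[i]|,3) + _best(mins[1:], maxs without i)
def bestMatch (mins maxs : List Int) : Int :=
  match mins with
  | [] => 0
  | a :: rest =>
    (PySem.List.min? ((List.range maxs.length).map (fun i =>
      min (|a - maxs.getD i 0|) 3 + bestMatch rest (maxs.eraseIdx i))) (fun x => x)).getD 0

def transform_dist_alt (seq1 : List Int) (seq2 : List Int) : Int :=
  let s1 := PySem.Set.ofList seq1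
  let cost : Int := ((seq2.filter (fun e => !(PySem.Set.contains s1 e))).length : Int)
  s1.foldl (fun cost element =>
    let I := pyIndices seq1 element
    let J := pyIndices seq2 element
    let p := if I.length < J.length then (J, I) else (I, J)
    cost + ((p.1.length : Int) - (p.2.length : Int) + bestMatch p.2 p.1)) cost

-- ===== PRECONDITION & SPEC =====
def Spec_transform_dist (seq1 : List Int) (seq2 : List Int) (out : Int) : Prop := out = transform_dist_alt seq1 seq2
instance (seq1 : List Int) (seq2 : List Int) (out : Int) : Decidable (Spec_transform_dist seq1 seq2 out) := by unfold Spec_transform_dist; infer_instance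

-- ===== CLAIM (what is proved, stated in full; the proofs are below) =====
def Claim_equal_transform_dist : Prop := ∀ (seq1 : List Int) (seq2 : List Int), Dom_transform_dist seq1 seq2 → Spec_transform_dist seq1 seq2 (transform_dist seq1 seq2)

-- ===== LEMMAS AND PROOFS =====

lemma min_char (l : List Int) (v : Int) (hv : v ∈ l) (hmin : ∀ y ∈ l, v ≤ y) :
    PySem.List.min? l (fun x => x) = some v := by
  cases h : PySem.List.min? l (fun x => x) with
  | none => rw [PySem.List.min?_eq_none_iff] at h; subst h; simp at hv
  | some m =>
    have h1 := PySem.List.min?_isMin h v hv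
    have h2 := hmin m (PySem.List.min?_mem h)
    simp only at h1
    rw [le_antisymm h1 h2]

lemma permutations_succ (xs : List Int) (r : Nat) :
    PySem.List.permutations xs (r+1)
    = (List.range xs.length).flatMap (fun i =>
        (PySem.List.permutations (xs.eraseIdx i) r).map (fun p => xs.getD i 0 :: p)) := by
  simp only [PySem.List.permutations]
  rw [List.flatMap, List.flatMap]
  congr 1
  apply List.map_congr_left
  intro i hi
  simp only [List.mem_range] at hi
  rw [List.getElem?_eq_getElem hi]
  simp [List.getD, List.getElem?_eq_getElem hi]

lemma permutations_ne_nil (r : Nat) : ∀ (xs : List Int), r ≤ xs.length →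
    PySem.List.permutations xs r ≠ [] := by
  induction r with
  | zero => intro xs h; simp [PySem.List.permutations]
  | succ n ih =>
    intro xs h
    rw [permutations_succ]
    intro hnil
    rw [List.flatMap_eq_nil_iff] at hnil
    have h0 : (0:Nat) ∈ List.range xs.length := by simp; omega
    have := hnil 0 h0
    simp only [List.map_eq_nil_iff] at this
    exact ih (xs.eraseIdx 0) (by rw [List.length_eraseIdx]; split <;> omega) this

def zipCost (mins perm : List Int) : Int := ((mins.zip perm).map (fun q => min (|q.1 - q.2|) 3)).sum

lemma map_range_zip : ∀ (mins perm : List Int), mins.length ≤ perm.length →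
    (List.range mins.length).map (fun k => min (|mins.getD k 0 - perm.getD k 0|) 3)
    = (mins.zip perm).map (fun q => min (|q.1 - q.2|) 3) := by
  intro mins
  induction mins with
  | nil => intro perm h; simp
  | cons a rest ih =>
    intro perm h
    cases perm with
    | nil => simp at h
    | cons x p =>
      simp only [List.length_cons, List.range_succ_eq_map, List.map_cons, List.map_map, List.zip_cons_cons]
      refine List.cons_eq_cons.mpr ⟨rfl, ?_⟩
      rw [← ih p (by simp at h; omega)]
      apply List.map_congr_left
      intro k _
      simp [Function.comp, List.getD]

lemma costFold_eq_zipCost (mins perm : List Int) (h : mins.length ≤ perm.length) :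
    (PySem.List.pyRange 0 (mins.length : Int) 1).foldl
      (fun sc idx => sc + min (|PySem.List.pyGetD mins idx 0 - PySem.List.pyGetD perm idx 0|) 3) 0
    = zipCost mins perm := by
  rw [PySem.List.foldl_add, PySem.List.pyRange_one]
  simp only [List.map_map, Int.sub_zero, Int.toNat_natCast]
  rw [zipCost, ← map_range_zip mins perm h]
  rw [zero_add]
  congr 1
  apply List.map_congr_left
  intro k _
  simp [PySem.List.pyGetD_natCast]


lemma min_perm_eq_bestMatch : ∀ (mins maxs : List Int), mins.length ≤ maxs.length →
    PySem.List.min? ((PySem.List.permutations maxs maxs.length).map (fun p => zipCost mins p)) (fun x => x)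
    = some (bestMatch mins maxs) := by
  intro mins
  induction mins with
  | nil =>
    intro maxs h
    obtain ⟨q, hq⟩ := List.exists_mem_of_ne_nil _ (permutations_ne_nil maxs.length maxs le_rfl)
    have : bestMatch [] maxs = 0 := rfl
    rw [this]
    apply min_char
    · exact List.mem_map.mpr ⟨q, hq, by simp [zipCost]⟩
    · intro y hy
      obtain ⟨p, _, hp⟩ := List.mem_map.mp hy
      simp [zipCost] at hp
      omega
  | cons a rest ih =>
    intro maxs h
    simp only [List.length_cons] at h
    obtain ⟨n, hn⟩ : ∃ n, maxs.length = n + 1 := ⟨maxs.length - 1, by omega⟩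
    have herase : ∀ i, i < maxs.length → (maxs.eraseIdx i).length = n := by
      intro i hi; rw [List.length_eraseIdx]; split <;> omega
    obtain ⟨v, hv⟩ : ∃ v, PySem.List.min? ((List.range maxs.length).map (fun i =>
        min (|a - maxs.getD i 0|) 3 + bestMatch rest (maxs.eraseIdx i))) (fun x => x) = some v := by
      cases hm : PySem.List.min? ((List.range maxs.length).map (fun i =>
        min (|a - maxs.getD i 0|) 3 + bestMatch rest (maxs.eraseIdx i))) (fun x => x) with
      | none =>
        rw [PySem.List.min?_eq_none_iff] at hm
        simp [hn] at hm
      | some v => exact ⟨v, rfl⟩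
    have hbest : bestMatch (a :: rest) maxs = v := by
      show (PySem.List.min? _ _).getD 0 = v
      rw [hv]; rfl
    have hvmem := PySem.List.min?_mem hv
    have hvmin := PySem.List.min?_isMin hv
    rw [hbest]
    apply min_char
    · obtain ⟨i, hi, hiv⟩ := List.mem_map.mp hvmem
      simp only [List.mem_range] at hi
      have hrest : rest.length ≤ (maxs.eraseIdx i).length := by rw [herase i hi]; omega
      have hrec := ih (maxs.eraseIdx i) hrest
      obtain ⟨p, hp, hpv⟩ := List.mem_map.mp (PySem.List.min?_mem hrec)
      refine List.mem_map.mpr ⟨maxs.getD i 0 :: p, ?_, ?_⟩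
      · rw [hn, permutations_succ]
        refine List.mem_flatMap.mpr ⟨i, List.mem_range.mpr hi, ?_⟩
        refine List.mem_map.mpr ⟨p, ?_, rfl⟩
        rw [herase i hi] at hp
        exact hp
      · show ((((a :: rest).zip (maxs.getD i 0 :: p)).map (fun q => min (|q.1 - q.2|) 3)).sum) = v
        rw [List.zip_cons_cons, List.map_cons, List.sum_cons]
        have : zipCost rest p = bestMatch rest (maxs.eraseIdx i) := hpv
        rw [zipCost] at this
        rw [this, hiv]
    · intro y hy
      obtain ⟨q, hq, hqy⟩ := List.mem_map.mp hy
      rw [hn, permutations_succ] at hq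
      obtain ⟨i, hi, hqi⟩ := List.mem_flatMap.mp hq
      simp only [List.mem_range] at hi
      obtain ⟨p, hp, hqp⟩ := List.mem_map.mp hqi
      have hrest : rest.length ≤ (maxs.eraseIdx i).length := by rw [herase i hi]; omega
      have hrec := ih (maxs.eraseIdx i) hrest
      have hple := PySem.List.min?_isMin hrec (zipCost rest p)
        (List.mem_map.mpr ⟨p, by rw [herase i hi]; exact hp, rfl⟩)
      have hvle := hvmin (min (|a - maxs.getD i 0|) 3 + bestMatch rest (maxs.eraseIdx i))
        (List.mem_map.mpr ⟨i, List.mem_range.mpr hi, rfl⟩)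
      subst hqp
      have hyq : y = min (|a - maxs.getD i 0|) 3 + zipCost rest p := by
        rw [← hqy]; simp [zipCost]
      simp only at hple hvle
      rw [hyq]
      omega

lemma contrib_core (mins maxs : List Int) (h : mins.length ≤ maxs.length) :
    (PySem.List.min? ((PySem.List.permutations maxs maxs.length).map (fun indices =>
       (PySem.List.pyRange 0 (mins.length : Int) 1).foldl
         (fun sc idx => sc + min (|PySem.List.pyGetD mins idx 0 - PySem.List.pyGetD indices idx 0|) 3) 0))
      (fun x => x)).getD 0
    = bestMatch mins maxs := by
  have hmap : (PySem.List.permutations maxs maxs.length).map (fun indices =>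
       (PySem.List.pyRange 0 (mins.length : Int) 1).foldl
         (fun sc idx => sc + min (|PySem.List.pyGetD mins idx 0 - PySem.List.pyGetD indices idx 0|) 3) 0)
      = (PySem.List.permutations maxs maxs.length).map (fun p => zipCost mins p) := by
    apply List.map_congr_left
    intro p hp
    have hlen : p.length = maxs.length := (PySem.List.perm_of_mem_permutations hp).length_eq
    exact costFold_eq_zipCost mins p (by omega)
  rw [hmap, min_perm_eq_bestMatch mins maxs h]
  rfl

lemma extra_eq (seq1 seq2 : List Int) :
    (((PySem.List.enumerate seq2).filter (fun p => !(seq1.contains p.2))).map (fun p => p.1)).length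
    = (seq2.filter (fun e => !(PySem.Set.contains (PySem.Set.ofList seq1) e))).length := by
  rw [List.length_map, ← List.countP_eq_length_filter, ← List.countP_eq_length_filter]
  have hpred : (fun e => !(PySem.Set.contains (PySem.Set.ofList seq1) e)) = (fun e : Int => !(seq1.contains e)) := by
    funext e
    have h1 : PySem.Set.contains (PySem.Set.ofList seq1) e = (e ∈ seq1 : Bool) := by
      simp [PySem.Set.contains, PySem.Set.mem_ofList]
    rw [h1]
    simp
  rw [hpred]
  have hcp : List.countP (fun p : Int × Int => !seq1.contains p.2) (PySem.List.enumerate seq2)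
      = List.countP (fun e => !seq1.contains e) ((PySem.List.enumerate seq2).map (fun x => x.2)) := by
    rw [List.countP_map]; rfl
  rw [hcp, PySem.List.map_snd_enumerate]

lemma contrib_eq (i1 i2 : List Int) :
    |(i1.length : Int) - (i2.length : Int)|
      + (PySem.List.min? ((PySem.List.permutations (if i1.length < i2.length then i2 else i1)
            (if i1.length < i2.length then i2 else i1).length).map (fun indices =>
          (PySem.List.pyRange 0 (((if i1.length < i2.length then i1 else i2).length : Nat) : Int) 1).foldl
            (fun sc idx => sc + min (|PySem.List.pyGetD (if i1.length < i2.length then i1 else i2) idx 0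
                - PySem.List.pyGetD indices idx 0|) 3) 0)) (fun x => x)).getD 0
    = ((if i1.length < i2.length then (i2, i1) else (i1, i2)).1.length : Int)
        - ((if i1.length < i2.length then (i2, i1) else (i1, i2)).2.length : Int)
        + bestMatch (if i1.length < i2.length then (i2, i1) else (i1, i2)).2
            (if i1.length < i2.length then (i2, i1) else (i1, i2)).1 := by
  by_cases hc : i1.length < i2.length
  · simp only [if_pos hc]
    rw [contrib_core i1 i2 (le_of_lt hc)]
    have habs : |(i1.length : Int) - (i2.length : Int)| = (i2.length : Int) - (i1.length : Int) := by
      rw [abs_of_nonpos (by omega)]; ring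
    rw [habs]
  · simp only [if_neg hc]
    rw [contrib_core i2 i1 (by omega)]
    have habs : |(i1.length : Int) - (i2.length : Int)| = (i1.length : Int) - (i2.length : Int) := by
      rw [abs_of_nonneg (by omega)]
    rw [habs]

-- ===== VERDICT (by name: the statement is the Claim_ definition above) =====
theorem transform_dist_spec : Claim_equal_transform_dist := by
  intro seq1 seq2 _
  simp only [Spec_transform_dist, transform_dist, transform_dist_alt]
  rw [PySem.List.foldl_congr_mem (PySem.Set.ofList seq1) _
    (fun cost element => cost + (|((pyIndices seq1 element).length : Int) - ((pyIndices seq2 element).length : Int)|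
      + (PySem.List.min? ((PySem.List.permutations
            (if (pyIndices seq1 element).length < (pyIndices seq2 element).length then pyIndices seq2 element else pyIndices seq1 element)
            (if (pyIndices seq1 element).length < (pyIndices seq2 element).length then pyIndices seq2 element else pyIndices seq1 element).length).map (fun indices =>
          (PySem.List.pyRange 0 (((if (pyIndices seq1 element).length < (pyIndices seq2 element).length then pyIndices seq1 element else pyIndices seq2 element).length : Nat) : Int) 1).foldl
            (fun sc idx => sc + min (|PySem.List.pyGetD (if (pyIndices seq1 element).length < (pyIndices seq2 element).length then pyIndices seq1 element else pyIndices seq2 element) idx 0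
                - PySem.List.pyGetD indices idx 0|) 3) 0)) (fun x => x)).getD 0)) 0
    (by intro acc x _; ring)]
  rw [PySem.List.foldl_add, PySem.List.foldl_add]
  rw [List.map_congr_left (fun e _ => contrib_eq (pyIndices seq1 e) (pyIndices seq2 e))]
  rw [extra_eq seq1 seq2]
  ring
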